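-- pv_equiv track=rewrite | github.com/Happy-ryan/PS | 백준/Bronze/30167. Distinct Digits/Distinct Digits.py | solution
-- ===== SOURCE A (Python) =====
-- def solution(l, r):
--
--     def digit(num: int):
--         res = set()
--         cnt = 0
--         while num:
--             x = num % 10
--             res.add(x)
--             cnt += 1
--             num //= 10
--
--         if len(res) == cnt:
--             return True
--
--         return False
--
--
--     answer = -1
--     for x in range(l, r + 1):
--         if digit(x):
--             answer = x
--             return answer
--
--     return answer
-- ===== SOURCE B (Python) =====
-- def solution(l, r):
--     # Prefix-jump scan: on a duplicated digit at power p, skip the whole block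
--     # of numbers sharing that duplicated prefix instead of testing them one by one.
--
--     def dup_pos(x):
--         # power of 10 of a repeated digit of x (leftmost repeat), or -1 if all distinct
--         ds = []
--         while x > 0:
--             ds.append(x % 10)
--             x //= 10
--         n = len(ds)
--         seen = set()
--         for j, d in enumerate(reversed(ds)):
--             if d in seen:
--                 return n - 1 - j
--             seen.add(d)
--         return -1
--
--     x = l
--     while x <= r:
--         p = dup_pos(x)
--         if p < 0:
--             return x
--         t = 10 ** p
--         x = x // t * t + t
--     return -1
-- ===== Notes on version B (the rewrite author's own statement) =====
-- stated objective: faster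
-- what changed: A tests every number in [l,r] one by one; B, on finding a duplicated digit at power p of x, jumps straight to x//10^p*10^p + 10^p, skipping the whole block of numbers that share the duplicated prefix, so only O(digits) candidates are ever examined.
import Mathlib
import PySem

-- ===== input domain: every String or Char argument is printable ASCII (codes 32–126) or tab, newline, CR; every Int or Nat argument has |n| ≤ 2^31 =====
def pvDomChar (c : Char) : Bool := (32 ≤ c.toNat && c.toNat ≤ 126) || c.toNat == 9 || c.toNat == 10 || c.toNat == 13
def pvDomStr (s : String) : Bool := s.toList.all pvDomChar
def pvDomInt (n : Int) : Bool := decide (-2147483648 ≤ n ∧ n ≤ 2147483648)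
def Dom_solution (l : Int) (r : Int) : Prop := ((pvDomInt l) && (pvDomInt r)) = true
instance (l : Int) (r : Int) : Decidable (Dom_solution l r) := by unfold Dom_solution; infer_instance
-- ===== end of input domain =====

-- B replaces A's one-by-one scan of [l, r] by a prefix-jump scan: on a duplicated digit at
-- power p it jumps x to x//10^p*10^p + 10^p, skipping the whole block of numbers that share
-- the duplicated prefix, so only O(digits) candidates are examined.

-- ===== PORT A =====
-- A's inner loop `while num:` of `digit`; transcribed with guard 0 < num — exact for
-- num ≥ 0 (every value tested under Pre_); Python's `while num` diverges for negative num,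
-- which Pre_solution excludes.
def digitLoop (res : PySem.Set Int) (cnt : Int) (num : Int) : PySem.Set Int × Int :=
  if 0 < num then
    digitLoop (PySem.Set.add res (PySem.Int.mod num 10)) (cnt + 1) (PySem.Int.floordiv num 10)
  else (res, cnt)
termination_by num.toNat
decreasing_by
  rename_i h
  rw [PySem.Int.floordiv_eq_ediv_of_pos (by norm_num)]
  have h1 := Int.ediv_add_emod num 10
  have h2 := Int.emod_lt_of_pos num (b := 10) (by norm_num)
  have h3 := Int.emod_nonneg num (b := 10) (by norm_num)
  omega

-- A's `digit`: `res = set(); cnt = 0; while num: …; return len(res) == cnt`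
def digit (num : Int) : Bool :=
  let rc := digitLoop PySem.Set.empty 0 num
  if PySem.Set.len rc.1 = rc.2 then true else false

-- A's `for x in range(l, r + 1)` with early return, else the initial answer -1
def forA (xs : List Int) : Int :=
  match xs with
  | [] => -1
  | x :: rest => if digit x then x else forA rest

def solution (l : Int) (r : Int) : Int := forA (PySem.List.pyRange l (r + 1) 1)

-- ===== PORT B =====
-- B's `while x > 0: ds.append(x % 10); x //= 10` (little-endian digit list)
def revDigits (x : Int) : List Int :=
  if 0 < x then PySem.Int.mod x 10 :: revDigits (PySem.Int.floordiv x 10) else []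
termination_by x.toNat
decreasing_by
  rename_i h
  rw [PySem.Int.floordiv_eq_ediv_of_pos (by norm_num)]
  have h1 := Int.ediv_add_emod x 10
  have h2 := Int.emod_lt_of_pos x (b := 10) (by norm_num)
  have h3 := Int.emod_nonneg x (b := 10) (by norm_num)
  omega

-- B's `for j, d in enumerate(reversed(ds)): …` with early return `n - 1 - j`
def dupScan (n : Int) (es : List (Int × Int)) (seen : PySem.Set Int) : Int :=
  match es with
  | [] => -1
  | (j, d) :: rest =>
    if PySem.Set.contains seen d then n - 1 - j
    else dupScan n rest (PySem.Set.add seen d)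

def dupPos (x : Int) : Int :=
  let ds := revDigits x
  dupScan (ds.length : Int) (PySem.List.enumerate ds.reverse) PySem.Set.empty

-- B's `while x <= r:` loop
def jumpLoop (r : Int) (x : Int) : Int :=
  if x ≤ r then
    let p := dupPos x
    if p < 0 then x
    else
      let t : Int := 10 ^ p.toNat   -- Python `10 ** p`; 0 ≤ p on this branch
      jumpLoop r (PySem.Int.floordiv x t * t + t)
  else -1
termination_by (r + 1 - x).toNat
decreasing_by
  rename_i hx _
  have ht : (0:Int) < 10 ^ (dupPos x).toNat := by positivity
  rw [PySem.Int.floordiv_eq_ediv_of_pos ht]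
  have h1 := Int.ediv_add_emod x (10 ^ (dupPos x).toNat)
  have h2 := Int.emod_lt_of_pos x ht
  have h3 := Int.emod_nonneg x (by omega : (10:Int) ^ (dupPos x).toNat ≠ 0)
  have key : x < x / 10 ^ (dupPos x).toNat * 10 ^ (dupPos x).toNat + 10 ^ (dupPos x).toNat := by
    linarith [h1, h2, mul_comm (x / 10 ^ (dupPos x).toNat) ((10:Int) ^ (dupPos x).toNat)]
  omega

def solution_alt (l : Int) (r : Int) : Int := jumpLoop r l

-- ===== PRECONDITION & SPEC =====
-- Pre_ excludes exactly the inputs where A does not return: for l < 0 with l ≤ r the very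
-- first iteration calls digit(l) on a negative number and `while num:` loops forever.
def Pre_solution (l : Int) (r : Int) : Prop := 0 ≤ l ∨ r < l
instance (l : Int) (r : Int) : Decidable (Pre_solution l r) := by
  unfold Pre_solution; infer_instance

def pvWitness_solution : Int × Int := (10, 25)

def Spec_solution (l : Int) (r : Int) (out : Int) : Prop := out = solution_alt l r
instance (l : Int) (r : Int) (out : Int) : Decidable (Spec_solution l r out) := by
  unfold Spec_solution; infer_instance

-- ===== CLAIM (what is proved, stated in full; the proofs are below) =====
def Claim_equal_solution : Prop :=
  ∀ (l : Int) (r : Int), Dom_solution l r → Pre_solution l r → Spec_solution l r (solution l r)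

-- ===== LEMMAS AND PROOFS =====

-- A's for-loop is `find?` with default -1
theorem forA_eq (xs : List Int) : forA xs = ((xs.find? digit).getD (-1)) := by
  induction xs with
  | nil => rfl
  | cons x rest ih =>
    by_cases h : digit x <;> simp [forA, List.find?, h, ih]

-- A's digit loop folds the little-endian digit list into the set and counts its length
theorem digitLoop_eq : ∀ (res : PySem.Set Int) (cnt num : Int),
    digitLoop res cnt num
      = ((revDigits num).foldl PySem.Set.add res, cnt + ((revDigits num).length : Int)) := by
  intro res cnt num
  induction res, cnt, num using digitLoop.induct with
  | case1 res cnt num h ih =>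
    rw [digitLoop, if_pos h, ih]
    conv_rhs => rw [revDigits]
    rw [if_pos h]
    simp [List.foldl]
    push_cast
    ring
  | case2 res cnt num h =>
    rw [digitLoop, if_neg h, revDigits, if_neg h]
    simp

-- length of the fold of Set.add equals the count iff the fed list is fresh and duplicate-free
theorem foldl_add_len (ds : List Int) : ∀ (s : PySem.Set Int),
    (ds.foldl PySem.Set.add s).length ≤ s.length + ds.length ∧
    ((ds.foldl PySem.Set.add s).length = s.length + ds.length
      ↔ ds.Nodup ∧ ∀ d ∈ ds, d ∉ s) := by
  induction ds with
  | nil => simp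
  | cons d rest ih =>
    intro s
    by_cases hd : d ∈ s
    · have hadd : PySem.Set.add s d = s := by
        show (if PySem.Set.contains s d then s else s ++ [d]) = s
        rw [if_pos ((PySem.Set.contains_iff s d).mpr hd)]
      have h1 := (ih s).1
      simp only [List.foldl, hadd, List.length_cons]
      constructor
      · omega
      · constructor
        · intro habs
          omega
        · rintro ⟨-, hfresh⟩
          exact absurd hd (hfresh d (by simp))
    · have hadd : PySem.Set.add s d = s ++ [d] := by
        show (if PySem.Set.contains s d then s else s ++ [d]) = s ++ [d]
        rw [if_neg (fun h => hd ((PySem.Set.contains_iff s d).mp h))]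
      have hlen : (PySem.Set.add s d).length = s.length + 1 := by simp [hadd]
      have h1 := (ih (PySem.Set.add s d)).1
      have h2 := (ih (PySem.Set.add s d)).2
      rw [hlen] at h1 h2
      simp only [List.foldl, List.length_cons]
      constructor
      · omega
      · constructor
        · intro he
          have hmain := h2.mp (by omega)
          refine ⟨List.nodup_cons.mpr ⟨?_, hmain.1⟩, ?_⟩
          · intro hdm
            have := hmain.2 d hdm
            rw [hadd] at this
            simp at this
          · intro e he'
            rcases List.mem_cons.mp he' with rfl | hmem
            · exact hd
            · have := hmain.2 e hmem
              rw [hadd] at this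
              simp only [List.mem_append, List.mem_singleton, not_or] at this
              exact this.1
        · rintro ⟨hnd, hfresh⟩
          have hnd' := List.nodup_cons.mp hnd
          have : (List.foldl PySem.Set.add (PySem.Set.add s d) rest).length
              = s.length + 1 + rest.length := by
            apply h2.mpr
            refine ⟨hnd'.2, ?_⟩
            intro e he'
            rw [hadd]
            simp only [List.mem_append, List.mem_singleton]
            rintro (hes | rfl)
            · exact hfresh e (by simp [he']) hes
            · exact hnd'.1 he'
          omega

theorem digit_iff (x : Int) : digit x = true ↔ (revDigits x).Nodup := by
  have h := (foldl_add_len (revDigits x) PySem.Set.empty).2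
  have hz : (PySem.Set.empty : List Int).length = 0 := rfl
  unfold digit
  rw [digitLoop_eq]
  simp only [PySem.Set.len]
  split_ifs with hlen
  · simp only [true_iff]
    refine (h.mp ?_).1
    omega
  · simp only [false_iff]
    intro hnd
    apply hlen
    have := h.mpr ⟨hnd, fun d hd hmem => (List.not_mem_nil hmem : False)⟩
    omega

theorem revDigits_floordiv (x : Int) (hx : 0 ≤ x) :
    revDigits (PySem.Int.floordiv x 10) = (revDigits x).drop 1 := by
  by_cases h : 0 < x
  · conv_rhs => rw [revDigits, if_pos h]
    simp
  · have hx0 : x = 0 := by omega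
    subst hx0
    have : PySem.Int.floordiv 0 10 = 0 := by
      rw [PySem.Int.floordiv_eq_ediv_of_pos (by norm_num : (0:Int) < 10)]
      norm_num
    rw [this]
    rw [revDigits]
    simp

theorem revDigits_floordiv_pow (p : Nat) : ∀ (x : Int), 0 ≤ x →
    revDigits (PySem.Int.floordiv x ((10:Int) ^ p)) = (revDigits x).drop p := by
  induction p with
  | zero =>
    intro x hx
    rw [PySem.Int.floordiv_eq_ediv_of_pos (by norm_num : (0:Int) < 10 ^ 0)]
    simp
  | succ p ih =>
    intro x hx
    have h10 : (0:Int) < 10 := by norm_num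
    have hpow : (0:Int) < 10 ^ p := by positivity
    have hpow1 : (0:Int) < 10 ^ (p + 1) := by positivity
    rw [PySem.Int.floordiv_eq_ediv_of_pos hpow1]
    have hsplit : x / 10 ^ (p + 1) = x / 10 / 10 ^ p := by
      rw [Int.ediv_ediv_of_nonneg (by norm_num : (0:Int) ≤ 10)]
      ring_nf
    rw [hsplit, ← PySem.Int.floordiv_eq_ediv_of_pos hpow,
        ← PySem.Int.floordiv_eq_ediv_of_pos h10]
    rw [ih (PySem.Int.floordiv x 10)
        (by rw [PySem.Int.floordiv_eq_ediv_of_pos h10]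
            exact Int.ediv_nonneg hx (by norm_num))]
    rw [revDigits_floordiv x hx, List.drop_drop, Nat.add_comm]

-- every y in the block [x, x//10^p*10^p + 10^p) keeps x's duplicated high digits
theorem digit_false_of_block (x y : Int) (p : Nat) (hx : 0 ≤ x)
    (hdup : ¬ ((revDigits x).drop p).Nodup) (h1 : x ≤ y)
    (h2 : y < PySem.Int.floordiv x ((10:Int) ^ p) * 10 ^ p + 10 ^ p) :
    digit y = false := by
  have ht : (0:Int) < 10 ^ p := by positivity
  have hy0 : (0:Int) ≤ y := le_trans hx h1
  rw [PySem.Int.floordiv_eq_ediv_of_pos ht] at h2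
  have hq : y / 10 ^ p = x / 10 ^ p := by
    have hle : x / 10 ^ p ≤ y / 10 ^ p := Int.ediv_le_ediv ht h1
    have hge : y / 10 ^ p ≤ x / 10 ^ p := by
      by_contra hcon
      push_neg at hcon
      have hm : (x / 10 ^ p + 1) * 10 ^ p ≤ (y / 10 ^ p) * 10 ^ p :=
        mul_le_mul_of_nonneg_right (by omega) (le_of_lt ht)
      have hyy : (y / 10 ^ p) * 10 ^ p ≤ y := by
        have he := Int.ediv_add_emod y (10 ^ p)
        have hm2 := Int.emod_nonneg y (ne_of_gt ht)
        linarith [mul_comm (y / 10 ^ p) ((10:Int) ^ p)]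
      rw [add_mul, one_mul] at hm
      linarith
    omega
  have hdropy : (revDigits y).drop p = (revDigits x).drop p := by
    rw [← revDigits_floordiv_pow p y hy0, ← revDigits_floordiv_pow p x hx,
        PySem.Int.floordiv_eq_ediv_of_pos ht, PySem.Int.floordiv_eq_ediv_of_pos ht, hq]
  have hnody : ¬ (revDigits y).Nodup := by
    intro hnd
    exact hdup (hdropy ▸ hnd.sublist (List.drop_sublist _ _))
  cases hdig : digit y with
  | false => rfl
  | true => exact absurd ((digit_iff y).mp hdig) hnody

theorem dupScan_neg (n : Int) : ∀ (tail pre : List Int), pre.Nodup →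
    ((pre.length : Int) + tail.length ≤ n) →
    dupScan n (PySem.List.enumerate tail (pre.length : Int)) (PySem.Set.ofList pre) < 0 →
    (pre ++ tail).Nodup := by
  intro tail
  induction tail with
  | nil => intro pre hnd _ _; simpa using hnd
  | cons d rest ih =>
    intro pre hnd hn hscan
    rw [PySem.List.enumerate_cons, dupScan] at hscan
    by_cases hd : d ∈ pre
    · rw [if_pos ((PySem.Set.contains_iff _ d).mpr ((PySem.Set.mem_ofList pre d).mpr hd))]
        at hscan
      exfalso
      simp only [List.length_cons] at hn
      push_cast at hn
      omega
    · rw [if_neg (fun hc => hd ((PySem.Set.mem_ofList pre d).mp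
          ((PySem.Set.contains_iff _ d).mp hc)))] at hscan
      have hofl : PySem.Set.add (PySem.Set.ofList pre) d = PySem.Set.ofList (pre ++ [d]) := by
        rw [PySem.Set.ofList_eq_foldl, PySem.Set.ofList_eq_foldl, List.foldl_append]
        rfl
      have hlen : ((pre.length : Int) + 1) = ((pre ++ [d]).length : Int) := by
        push_cast
        simp
      rw [hofl, hlen] at hscan
      have hnd2 : (pre ++ [d]).Nodup := by
        simp [List.nodup_append, hnd]
        exact fun a ha hae => hd (hae ▸ ha)
      have hn2 : (((pre ++ [d]).length : Int) + (rest.length : Int) ≤ n) := by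
        simp only [List.length_cons] at hn
        push_cast at hn ⊢
        simp only [List.length_append, List.length_cons, List.length_nil]
        push_cast
        omega
      have hres := ih (pre ++ [d]) hnd2 hn2 hscan
      simpa [List.append_assoc] using hres

theorem dupScan_pos (n : Int) : ∀ (tail pre : List Int),
    0 ≤ dupScan n (PySem.List.enumerate tail (pre.length : Int)) (PySem.Set.ofList pre) →
    ∃ j : Nat,
      dupScan n (PySem.List.enumerate tail (pre.length : Int)) (PySem.Set.ofList pre)
        = n - 1 - (j : Int) ∧ ¬ ((pre ++ tail).take (j + 1)).Nodup := by
  intro tail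
  induction tail with
  | nil =>
    intro pre h
    rw [PySem.List.enumerate_nil, dupScan] at h
    omega
  | cons d rest ih =>
    intro pre h
    rw [PySem.List.enumerate_cons, dupScan] at h ⊢
    by_cases hd : d ∈ pre
    · rw [if_pos ((PySem.Set.contains_iff _ d).mpr ((PySem.Set.mem_ofList pre d).mpr hd))]
        at h ⊢
      refine ⟨pre.length, rfl, ?_⟩
      have htake : (pre ++ d :: rest).take (pre.length + 1) = pre ++ [d] := by
        rw [List.take_append]
        simp
      rw [htake]
      intro hnd
      exact ((List.nodup_append.mp hnd).2.2 d hd d (List.mem_singleton.mpr rfl)) rfl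
    · rw [if_neg (fun hc => hd ((PySem.Set.mem_ofList pre d).mp
          ((PySem.Set.contains_iff _ d).mp hc)))] at h ⊢
      have hofl : PySem.Set.add (PySem.Set.ofList pre) d = PySem.Set.ofList (pre ++ [d]) := by
        rw [PySem.Set.ofList_eq_foldl, PySem.Set.ofList_eq_foldl, List.foldl_append]
        rfl
      have hlen : ((pre.length : Int) + 1) = ((pre ++ [d]).length : Int) := by
        push_cast
        simp
      rw [hofl, hlen] at h ⊢
      obtain ⟨j, hj1, hj2⟩ := ih (pre ++ [d]) h
      exact ⟨j, hj1, by simpa [List.append_assoc] using hj2⟩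

theorem dupPos_neg (x : Int) (h : dupPos x < 0) : (revDigits x).Nodup := by
  rw [← List.nodup_reverse]
  have h2 := dupScan_neg ((revDigits x).length : Int) (revDigits x).reverse []
    List.nodup_nil (by simp) (by simpa [dupPos] using h)
  simpa using h2

theorem dupPos_pos (x : Int) (h : 0 ≤ dupPos x) :
    ¬ ((revDigits x).drop (dupPos x).toNat).Nodup := by
  obtain ⟨j, hj1, hj2⟩ := dupScan_pos ((revDigits x).length : Int) (revDigits x).reverse []
    (by simpa [dupPos] using h)
  have hdp : dupPos x = ((revDigits x).length : Int) - 1 - j := by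
    simpa [dupPos] using hj1
  have hjlt : (j : Int) + 1 ≤ ((revDigits x).length : Int) := by omega
  intro hnd
  apply hj2
  simp only [List.nil_append]
  rw [List.take_reverse, List.nodup_reverse]
  have hto : (dupPos x).toNat = (revDigits x).length - (j + 1) := by omega
  simpa [List.length_reverse, ← hto] using hnd

theorem jumpLoop_eq (r : Int) : ∀ (x : Int), 0 ≤ x →
    jumpLoop r x = ((PySem.List.pyRange x (r + 1)).find? digit).getD (-1) := by
  suffices H : ∀ (k : Nat) (x : Int), (r + 1 - x).toNat = k → 0 ≤ x →
      jumpLoop r x = ((PySem.List.pyRange x (r + 1)).find? digit).getD (-1) by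
    intro x hx
    exact H _ x rfl hx
  intro k
  induction k using Nat.strong_induction_on with
  | _ k ih =>
    intro x hk hx
    by_cases hxr : x ≤ r
    · rw [jumpLoop]
      simp only [if_pos hxr]
      by_cases hp : dupPos x < 0
      · simp only [if_pos hp]
        rw [PySem.List.pyRange_one_cons (by omega : x < r + 1)]
        have hdig : digit x = true := (digit_iff x).mpr (dupPos_neg x hp)
        simp [List.find?, hdig]
      · simp only [if_neg hp]
        push_neg at hp
        have ht : (0:Int) < 10 ^ (dupPos x).toNat := by positivity
        set t : Int := 10 ^ (dupPos x).toNat with htdef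
        set x' := PySem.Int.floordiv x t * t + t with hxdef
        have hxlt : x < x' := by
          rw [hxdef, PySem.Int.floordiv_eq_ediv_of_pos ht]
          have he := Int.ediv_add_emod x t
          have hm := Int.emod_lt_of_pos x ht
          linarith [mul_comm (x / t) t]
        have hdup := dupPos_pos x hp
        have hblock : ∀ y : Int, x ≤ y → y < x' → digit y = false := by
          intro y h1 h2
          exact digit_false_of_block x y (dupPos x).toNat hx hdup h1
            (by simpa [hxdef, htdef] using h2)
        have hrec : jumpLoop r x' = ((PySem.List.pyRange x' (r + 1)).find? digit).getD (-1) :=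
          ih ((r + 1 - x').toNat) (by omega) x' rfl (by omega)
        rw [hrec]
        by_cases hx'r : x' ≤ r + 1
        · rw [PySem.List.pyRange_one_append x x' (r + 1) (le_of_lt hxlt) hx'r,
              List.find?_append]
          have hnone : (PySem.List.pyRange x x').find? digit = none := by
            rw [List.find?_eq_none]
            intro y hy
            have hmem := PySem.List.mem_pyRange_one.mp hy
            simp [hblock y hmem.1 hmem.2]
          rw [hnone, Option.none_or]
        · have hall : (PySem.List.pyRange x (r + 1)).find? digit = none := by
            rw [List.find?_eq_none]
            intro y hy
            have hmem := PySem.List.mem_pyRange_one.mp hy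
            simp [hblock y hmem.1 (by omega)]
          have hemp : PySem.List.pyRange x' (r + 1) = [] :=
            PySem.List.pyRange_one_eq_nil (by omega)
          rw [hall, hemp]
          simp [List.find?]
    · rw [jumpLoop, if_neg hxr, PySem.List.pyRange_one_eq_nil (by omega)]
      simp [List.find?]

-- ===== VERDICT (by name: the statement is the Claim_ definition above) =====
theorem solution_spec : Claim_equal_solution := by
  intro l r _ hpre
  unfold Spec_solution solution solution_alt
  rcases hpre with hl | hrl
  · rw [jumpLoop_eq r l hl, forA_eq]
  · rw [PySem.List.pyRange_one_eq_nil (by omega), jumpLoop]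
    simp [forA, if_neg (by omega : ¬ l ≤ r)]
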